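-- pv_equiv track=rewrite | github.com/js4ngu/NTT-study | SW/test_helper.py | multPolyNaive
-- ===== SOURCE A (Python) =====
-- def multPolyNaive(A, B, f, q):
--     C = [0]*(len(A)+len(B)-1)
--     for i in range(len(A)):
--         for j in range(len(B)):
--             C[i+j] += A[i]*B[j]
--             C[i+j] %= q
--
--
--     # Polynomial Modulo
--     while len(f) <= len(C):
--         tmp = [0] * (len(C) - len(f)) + f
--         m_num = C[-1]
--         for i in range(len(C)):
--             C[i] -= (tmp[i] * m_num)
--             C[i] %= q
--         if C[-1] == 0:
--             C = C[:-1]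
--     return C
-- ===== SOURCE B (Python) =====
-- def multPolyNaive(A, B, f, q):
--     n, m = len(A), len(B)
--     C = [sum(A[i] * B[k - i] for i in range(max(0, k - m + 1), min(k + 1, n))) % q
--          for k in range(n + m - 1)]
--     d = len(f)
--     while len(C) >= d:
--         mnum = C.pop()
--         base = len(C) - (d - 1)
--         for j in range(d - 1):
--             C[base + j] = (C[base + j] - mnum * f[j]) % q
--     return C
-- ===== Notes on version B (the rewrite author's own statement) =====
-- stated objective: alternative
-- what changed: B computes each product coefficient directly as one clipped convolution sum reduced mod q once (instead of accumulating over all (i,j) pairs in place), and the reduction step pops the leading coefficient and subtracts mnum*f only on the top len(f)-1 window, instead of rebuilding a zero-padded copy of f and re-scanning and re-modding the whole coefficient array on every iteration.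
-- outside the precondition, e.g. on multPolyNaive([1], [5, 1], [1, 4], 9): A returns [7], B returns [4]; on multPolyNaive([1], [1], [2], 5): A does not finish within the time limit, B returns []
import Mathlib
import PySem

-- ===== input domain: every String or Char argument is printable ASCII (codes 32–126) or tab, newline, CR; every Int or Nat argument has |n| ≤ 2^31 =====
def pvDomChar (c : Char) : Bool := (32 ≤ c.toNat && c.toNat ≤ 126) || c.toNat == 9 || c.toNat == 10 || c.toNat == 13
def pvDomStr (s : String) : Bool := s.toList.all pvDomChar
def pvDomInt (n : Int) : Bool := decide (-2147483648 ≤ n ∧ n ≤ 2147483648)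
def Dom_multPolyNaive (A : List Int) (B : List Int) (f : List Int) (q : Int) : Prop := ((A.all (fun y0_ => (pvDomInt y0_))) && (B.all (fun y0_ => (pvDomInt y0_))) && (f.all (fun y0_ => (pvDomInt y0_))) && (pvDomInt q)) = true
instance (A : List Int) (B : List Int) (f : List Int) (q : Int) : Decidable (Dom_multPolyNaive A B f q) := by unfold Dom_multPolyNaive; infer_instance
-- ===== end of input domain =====

-- B computes each product coefficient as one clipped convolution sum reduced mod q once, and its
-- reduction pops the leading coefficient and touches only the top len(f)-1 window, instead of A's
-- full re-scan (and re-mod) of the whole coefficient array on every trim; objective: alternative.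

-- a loop of in-place element assignments preserves the list length (cited by loopB's decreasing_by)
theorem length_foldl_pySetD (idxs : List Int) (p : Int → Int) (g : List Int → Int → Int)
    (C : List Int) :
    (idxs.foldl (fun c i => PySem.List.pySetD c (p i) (g c i)) C).length = C.length := by
  induction idxs generalizing C with
  | nil => rfl
  | cons i t ih => rw [List.foldl_cons, ih, PySem.List.length_pySetD]

-- ===== PORT A =====
-- one iteration of A's 'while' body: zero-padded copy of f, full-array subtract-and-mod pass,
-- conditional trim of the trailing zero
def stepA (f : List Int) (q : Int) (C : List Int) : List Int :=
  let tmp : List Int := List.replicate (C.length - f.length) 0 ++ f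
  let mnum := PySem.List.pyGetD C (-1) 0
  let C' := (PySem.List.pyRange 0 (C.length : Int)).foldl
      (fun c i => PySem.List.pySetD c i
        (PySem.Int.mod (PySem.List.pyGetD c i 0 - PySem.List.pyGetD tmp i 0 * mnum) q)) C
  if PySem.List.pyGetD C' (-1) 0 == 0 then PySem.List.slice C' none (some (-1)) else C'

-- A's 'while' diverges when f is not monic mod q (excluded by Pre_); fueled, and under Pre_ every
-- iteration trims one coefficient, so fuel len(C)+1 reproduces the loop exactly
def loopA (f : List Int) (q : Int) : Nat → List Int → List Int
  | 0, C => C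
  | fuel + 1, C => if f.length ≤ C.length then loopA f q fuel (stepA f q C) else C

def multPolyNaive (A : List Int) (B : List Int) (f : List Int) (q : Int) : List Int :=
  let C := (PySem.List.pyRange 0 (A.length : Int)).foldl (fun c i =>
      (PySem.List.pyRange 0 (B.length : Int)).foldl (fun c j =>
        PySem.List.pySetD c (i + j)
          (PySem.Int.mod
            (PySem.List.pyGetD c (i + j) 0 + PySem.List.pyGetD A i 0 * PySem.List.pyGetD B j 0)
            q)) c)
    (List.replicate ((A.length : Int) + (B.length : Int) - 1).toNat 0)
  loopA f q (C.length + 1) C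

-- ===== PORT B =====
-- one iteration of B's 'while' body: pop the leading coefficient, subtract mnum*f on the top window
def stepB (f : List Int) (q : Int) (C : List Int) : List Int :=
  let mnum := C.getLastD 0
  let C' := C.dropLast
  let base : Int := (C'.length : Int) - ((f.length : Int) - 1)
  (PySem.List.pyRange 0 ((f.length : Int) - 1)).foldl
    (fun c j => PySem.List.pySetD c (base + j)
      (PySem.Int.mod (PySem.List.pyGetD c (base + j) 0 - mnum * PySem.List.pyGetD f j 0) q)) C'

def loopB (f : List Int) (q : Int) (C : List Int) : List Int :=
  if f.length ≤ C.length then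
    if hC : C = [] then C   -- C.pop() raises IndexError here (possible only when f = []); outside Pre_
    else loopB f q (stepB f q C)
  else C
termination_by C.length
decreasing_by
  have h : (stepB f q C).length = C.length - 1 := by
    unfold stepB
    rw [length_foldl_pySetD, List.length_dropLast]
  have : C.length ≠ 0 := fun h0 => hC (List.eq_nil_of_length_eq_zero h0)
  omega

def multPolyNaive_alt (A : List Int) (B : List Int) (f : List Int) (q : Int) : List Int :=
  let C := (PySem.List.pyRange 0 ((A.length : Int) + (B.length : Int) - 1)).map (fun k =>
    PySem.Int.mod
      ((PySem.List.pyRange (max 0 (k - (B.length : Int) + 1)) (min (k + 1) (A.length : Int))).foldl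
        (fun s i => s + PySem.List.pyGetD A i 0 * PySem.List.pyGetD B (k - i) 0) 0) q)
  loopB f q C

-- ===== PRECONDITION & SPEC =====
-- Pre_ excludes f = [] and q = 0 (A raises IndexError resp. ZeroDivisionError, except when the
-- product is empty and neither is evaluated) and, when a reduction step actually runs on a nonzero
-- product, f whose last coefficient is not ≡ 1 mod q: there A's while loop usually diverges and,
-- when it happens to terminate, has applied extra non-trimming subtraction passes that B's
-- unconditional pop does not.
def Pre_multPolyNaive (A : List Int) (B : List Int) (f : List Int) (q : Int) : Prop :=
  f ≠ [] ∧
  ((A.length : Int) + (B.length : Int) - 1 ≤ 0 ∨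
    (q ≠ 0 ∧
      ((A.length : Int) + (B.length : Int) - 1 < (f.length : Int) ∨
        A.length = 0 ∨ B.length = 0 ∨ PySem.Int.mod (f.getLastD 0 - 1) q = 0)))
instance (A : List Int) (B : List Int) (f : List Int) (q : Int) :
    Decidable (Pre_multPolyNaive A B f q) := by unfold Pre_multPolyNaive; infer_instance

def pvWitness_multPolyNaive : List Int × List Int × List Int × Int := ([1, 2], [3, 4], [0, 1], 5)

def Spec_multPolyNaive (A : List Int) (B : List Int) (f : List Int) (q : Int) (out : List Int) :
    Prop := out = multPolyNaive_alt A B f q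
instance (A : List Int) (B : List Int) (f : List Int) (q : Int) (out : List Int) :
    Decidable (Spec_multPolyNaive A B f q out) := by unfold Spec_multPolyNaive; infer_instance

-- ===== CLAIM (what is proved, stated in full; the proofs are below) =====
def Claim_equal_multPolyNaive : Prop := ∀ (A : List Int) (B : List Int) (f : List Int) (q : Int),
  Dom_multPolyNaive A B f q → Pre_multPolyNaive A B f q →
    Spec_multPolyNaive A B f q (multPolyNaive A B f q)

-- ===== LEMMAS AND PROOFS =====

theorem pv_mod_congr (q a b : Int) (h : q ∣ a - b) :
    PySem.Int.mod a q = PySem.Int.mod b q := by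
  by_cases hq : q = 0
  · subst hq
    obtain ⟨t, ht⟩ := h
    have hab : a = b := by linarith [ht]
    rw [hab]
  have ha := PySem.Int.floordiv_mul_add_mod a q
  have hb := PySem.Int.floordiv_mul_add_mod b q
  obtain ⟨t, ht⟩ := h
  have hd : q ∣ PySem.Int.mod a q - PySem.Int.mod b q :=
    ⟨t - PySem.Int.floordiv a q + PySem.Int.floordiv b q, by ring_nf; linarith⟩
  rcases lt_or_gt_of_ne hq with hneg | hpos
  · have h1 := PySem.Int.mod_neg_bounds a hneg
    have h2 := PySem.Int.mod_neg_bounds b hneg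
    have h0 : PySem.Int.mod a q - PySem.Int.mod b q = 0 :=
      Int.eq_zero_of_abs_lt_dvd ((Int.neg_dvd).mpr hd) (abs_lt.mpr ⟨by omega, by omega⟩)
    omega
  · have h1 := PySem.Int.mod_nonneg a hpos
    have h2 := PySem.Int.mod_lt a hpos
    have h3 := PySem.Int.mod_nonneg b hpos
    have h4 := PySem.Int.mod_lt b hpos
    have h0 : PySem.Int.mod a q - PySem.Int.mod b q = 0 :=
      Int.eq_zero_of_abs_lt_dvd hd (abs_lt.mpr ⟨by omega, by omega⟩)
    omega

theorem pv_mod_zero (q : Int) : PySem.Int.mod 0 q = 0 :=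
  (PySem.Int.mod_eq_zero_iff_dvd 0 q).mpr (dvd_zero q)

theorem pv_mod_idem (q a : Int) :
    PySem.Int.mod (PySem.Int.mod a q) q = PySem.Int.mod a q := by
  have ha := PySem.Int.floordiv_mul_add_mod a q
  exact pv_mod_congr q _ a ⟨-PySem.Int.floordiv a q, by linarith⟩

theorem pv_getD_set (xs : List Int) (n : Nat) (v : Int) (k : Nat) :
    (xs.set n v).getD k 0 = if k = n ∧ k < xs.length then v else xs.getD k 0 := by
  simp only [List.getD_eq_getElem?_getD, List.getElem?_set]
  split_ifs with h1 h2 h3 h4 <;> simp_all <;> omega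

theorem foldl_set_window (g : Nat → Int → Int) (off : Nat) (t : Nat) (C : List Int) :
    ((List.range t).foldl (fun c k => c.set (off + k) (g k (c.getD (off + k) 0))) C).length
        = C.length
    ∧ ∀ k : Nat,
      ((List.range t).foldl (fun c k => c.set (off + k) (g k (c.getD (off + k) 0))) C).getD k 0
        = if off ≤ k ∧ k < off + t ∧ k < C.length then g (k - off) (C.getD k 0) else C.getD k 0 := by
  induction t with
  | zero => simp; intro k h1 h2 _; omega
  | succ t ih =>
    obtain ⟨ihl, ihe⟩ := ih
    rw [List.range_succ, List.foldl_append, List.foldl_cons, List.foldl_nil]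
    refine ⟨by rw [List.length_set, ihl], ?_⟩
    intro k
    rw [pv_getD_set, ihl, ihe, ihe]
    by_cases hk : k = off + t
    · subst hk
      by_cases h2 : off + t < C.length
      · rw [if_pos ⟨rfl, h2⟩, if_neg (show ¬(off ≤ off + t ∧ off + t < off + t ∧ off + t < C.length) by omega), if_pos (by omega), Nat.add_sub_cancel_left]
      · rw [if_neg (fun h => h2 h.2), if_neg (by omega), if_neg (by omega)]
    · rw [if_neg (fun h => hk h.1)]
      by_cases h3 : off ≤ k ∧ k < off + t ∧ k < C.length
      · rw [if_pos h3, if_pos (by omega)]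
      · rw [if_neg h3, if_neg (by omega)]

theorem length_stepB (f : List Int) (q : Int) (C : List Int) :
    (stepB f q C).length = C.length - 1 := by
  unfold stepB
  rw [length_foldl_pySetD, List.length_dropLast]

-- the partial convolution after i rows of A's accumulation loop
def convS (A B : List Int) (i k : Nat) : Int :=
  ∑ t ∈ Finset.range i, if t ≤ k then A.getD t 0 * B.getD (k - t) 0 else 0

theorem foldl_set_zero (g : Nat → Int → Int) (t : Nat) (C : List Int) :
    ((List.range t).foldl (fun c k => c.set k (g k (c.getD k 0))) C).length = C.length
    ∧ ∀ k : Nat,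
      ((List.range t).foldl (fun c k => c.set k (g k (c.getD k 0))) C).getD k 0
        = if k < t ∧ k < C.length then g k (C.getD k 0) else C.getD k 0 := by
  have h := foldl_set_window g 0 t C
  simpa using h

theorem pv_list_ext (xs ys : List Int) (hl : xs.length = ys.length)
    (h : ∀ k, k < xs.length → xs.getD k 0 = ys.getD k 0) : xs = ys := by
  apply List.ext_getElem hl
  intro k h1 h2
  have := h k h1
  simpa [List.getD_eq_getElem?_getD, List.getElem?_eq_getElem h1, List.getElem?_eq_getElem h2]
    using this

theorem pv_getD_dropLast (xs : List Int) (k : Nat) (h : k < xs.length - 1) :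
    xs.dropLast.getD k 0 = xs.getD k 0 := by
  have hk : k < xs.length := by omega
  simp [List.getD_eq_getElem?_getD, List.getElem?_dropLast, h, List.getElem?_eq_getElem hk]

theorem pv_getD_tmp (f : List Int) (s k : Nat) :
    (List.replicate s (0:Int) ++ f).getD k 0 = if k < s then 0 else f.getD (k - s) 0 := by
  by_cases h : k < s
  · rw [if_pos h, List.getD_append _ _ _ k (by simpa using h)]
    exact List.getD_replicate _ (by simpa using h)
  · rw [if_neg h, List.getD_append_right _ _ _ k (by simpa using Nat.le_of_not_lt h)]
    simp

-- the A-side full pass, in window form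

theorem stepA_pass (tmp : List Int) (m q : Int) (C : List Int) :
    ((PySem.List.pyRange 0 (C.length : Int)).foldl
      (fun c i => PySem.List.pySetD c i
        (PySem.Int.mod (PySem.List.pyGetD c i 0 - PySem.List.pyGetD tmp i 0 * m) q)) C)
    = (List.range C.length).foldl
        (fun c k => c.set k
          (PySem.Int.mod (c.getD k 0 - tmp.getD k 0 * m) q)) C := by
  rw [PySem.List.pyRange_one, List.foldl_map]
  norm_num

theorem stepB_pass (f : List Int) (m q : Int) (C' : List Int) (hf1 : 1 ≤ f.length)
    (h : f.length - 1 ≤ C'.length) :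
    ((PySem.List.pyRange 0 ((f.length : Int) - 1)).foldl
      (fun c j => PySem.List.pySetD c ((((C'.length : Int)) - ((f.length : Int) - 1)) + j)
        (PySem.Int.mod
          (PySem.List.pyGetD c ((((C'.length : Int)) - ((f.length : Int) - 1)) + j) 0
            - m * PySem.List.pyGetD f j 0) q)) C')
    = (List.range (f.length - 1)).foldl
        (fun c k => c.set ((C'.length - (f.length - 1)) + k)
          (PySem.Int.mod (c.getD ((C'.length - (f.length - 1)) + k) 0 - m * f.getD k 0) q)) C' := by
  have hbase : (((C'.length : Int)) - ((f.length : Int) - 1))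
      = ((C'.length - (f.length - 1) : Nat) : Int) := by omega
  have hcnt : (((f.length : Int) - 1) - 0).toNat = f.length - 1 := by omega
  rw [PySem.List.pyRange_one, hcnt, List.foldl_map, hbase]
  simp only [zero_add, ← Nat.cast_add, PySem.List.pySetD_natCast, PySem.List.pyGetD_natCast]

theorem passA_facts (tmp : List Int) (m q : Int) (C : List Int) :
    (((List.range C.length).foldl
        (fun c k => c.set k (PySem.Int.mod (c.getD k 0 - tmp.getD k 0 * m) q)) C)).length
      = C.length
    ∧ ∀ k : Nat,
      (((List.range C.length).foldl
        (fun c k => c.set k (PySem.Int.mod (c.getD k 0 - tmp.getD k 0 * m) q)) C)).getD k 0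
        = if k < C.length then PySem.Int.mod (C.getD k 0 - tmp.getD k 0 * m) q
          else C.getD k 0 := by
  obtain ⟨h1, h2⟩ :=
    foldl_set_zero (fun k x => PySem.Int.mod (x - tmp.getD k 0 * m) q) C.length C
  refine ⟨h1, fun k => ?_⟩
  have h := h2 k
  simpa using h

theorem passB_facts (f : List Int) (m q : Int) (C' : List Int) :
    (((List.range (f.length - 1)).foldl
        (fun c k => c.set ((C'.length - (f.length - 1)) + k)
          (PySem.Int.mod (c.getD ((C'.length - (f.length - 1)) + k) 0 - m * f.getD k 0) q)) C')).length
      = C'.length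
    ∧ ∀ k : Nat,
      (((List.range (f.length - 1)).foldl
        (fun c k => c.set ((C'.length - (f.length - 1)) + k)
          (PySem.Int.mod (c.getD ((C'.length - (f.length - 1)) + k) 0 - m * f.getD k 0) q)) C')).getD k 0
        = if (C'.length - (f.length - 1)) ≤ k ∧ k < (C'.length - (f.length - 1)) + (f.length - 1)
              ∧ k < C'.length
          then PySem.Int.mod (C'.getD k 0 - m * f.getD (k - (C'.length - (f.length - 1))) 0) q
          else C'.getD k 0 :=
  foldl_set_window (fun k x => PySem.Int.mod (x - m * f.getD k 0) q)
    (C'.length - (f.length - 1)) (f.length - 1) C'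

theorem pv_getD_mem (xs : List Int) (k : Nat) (h : k < xs.length) : xs.getD k 0 ∈ xs := by
  rw [List.getD_eq_getElem xs 0 h]
  exact List.getElem_mem h

theorem step_eq (f : List Int) (q : Int) (C : List Int) (hf : f ≠ [])
    (hdvd : ∀ hC : C ≠ [], q ∣ (f.getLast hf - 1) * C.getLast hC) (hlen : f.length ≤ C.length)
    (hnorm : ∀ c ∈ C, PySem.Int.mod c q = c) :
    stepA f q C = stepB f q C := by
  have hd1 : 1 ≤ f.length := List.length_pos_of_ne_nil hf
  have hL1 : 1 ≤ C.length := le_trans hd1 hlen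
  have hC : C ≠ [] := by
    intro h; rw [h] at hL1; simp at hL1
  have hm1 : PySem.List.pyGetD C (-1) 0 = C.getLast hC := PySem.List.pyGetD_neg_one C 0 hC
  have hm2 : C.getLastD 0 = C.getLast hC := by
    rw [List.getLastD_eq_getLast?, List.getLast?_eq_some_getLast hC]
    rfl
  have hdrop : C.dropLast.length = C.length - 1 := by simp
  simp only [stepA, stepB]
  rw [hm1, hm2, stepA_pass, stepB_pass f (C.getLast hC) q C.dropLast hd1 (by omega)]
  obtain ⟨hAlen, hAget⟩ :=
    passA_facts (List.replicate (C.length - f.length) 0 ++ f) (C.getLast hC) q C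
  obtain ⟨hBlen, hBget⟩ := passB_facts f (C.getLast hC) q C.dropLast
  -- the top coefficient becomes 0 after A's pass
  have hCm : C.getD (C.length - 1) 0 = C.getLast hC := by
    rw [List.getD_eq_getElem C 0 (by omega), List.getLast_eq_getElem]
  have htmp : (List.replicate (C.length - f.length) 0 ++ f).getD (C.length - 1) 0
      = f.getLast hf := by
    rw [pv_getD_tmp, if_neg (by omega), List.getLast_eq_getElem,
      List.getD_eq_getElem f 0 (by omega)]
    congr 1
    omega
  have htop :
      PySem.Int.mod
        (C.getD (C.length - 1) 0
          - (List.replicate (C.length - f.length) 0 ++ f).getD (C.length - 1) 0 * C.getLast hC) q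
      = 0 := by
    rw [hCm, htmp, PySem.Int.mod_eq_zero_iff_dvd]
    have h1 : q ∣ (f.getLast hf - 1) * C.getLast hC := hdvd hC
    have h2 : C.getLast hC - f.getLast hf * C.getLast hC
        = -((f.getLast hf - 1) * C.getLast hC) := by ring
    rw [h2]
    exact h1.neg_right
  -- evaluate A's trailing if: the last entry is 0, so the trim happens
  have hRAne :
      ((List.range C.length).foldl
        (fun c k => c.set k
          (PySem.Int.mod
            (c.getD k 0
              - (List.replicate (C.length - f.length) 0 ++ f).getD k 0 * C.getLast hC) q)) C)
      ≠ [] := by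
    intro h
    rw [h] at hAlen
    simp at hAlen
    omega
  have hlast : PySem.List.pyGetD
      ((List.range C.length).foldl
        (fun c k => c.set k
          (PySem.Int.mod
            (c.getD k 0
              - (List.replicate (C.length - f.length) 0 ++ f).getD k 0 * C.getLast hC) q)) C)
      (-1) 0 = 0 := by
    rw [PySem.List.pyGetD_neg_one _ 0 hRAne, List.getLast_eq_getElem,
      ← List.getD_eq_getElem _ 0, hAlen, hAget, if_pos (by omega)]
    exact htop
  rw [hlast]
  simp only [beq_self_eq_true, if_true]
  rw [PySem.List.slice_to_neg_one]
  -- now compare the two resulting lists entrywise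
  apply pv_list_ext
  · rw [List.length_dropLast, hAlen, hBlen, hdrop]
  · intro k hk
    rw [List.length_dropLast, hAlen] at hk
    rw [pv_getD_dropLast _ k (by omega), hAget, if_pos (by omega), hBget]
    by_cases hcase : k < C.length - f.length
    · rw [if_neg (by omega), pv_getD_tmp, if_pos (by omega), pv_getD_dropLast _ k (by omega)]
      have h0 : C.getD k 0 - 0 * C.getLast hC = C.getD k 0 := by ring
      rw [h0]
      exact hnorm _ (pv_getD_mem C k (by omega))
    · rw [if_pos (by omega), pv_getD_tmp, if_neg (by omega), pv_getD_dropLast _ k (by omega)]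
      have harg : k - (C.dropLast.length - (f.length - 1)) = k - (C.length - f.length) := by
        omega
      rw [harg, mul_comm]

theorem norm_stepB (f : List Int) (q : Int) (C : List Int) (hf : f ≠ [])
    (hlen : f.length ≤ C.length) (hnorm : ∀ c ∈ C, PySem.Int.mod c q = c) :
    ∀ c ∈ stepB f q C, PySem.Int.mod c q = c := by
  have hd1 : 1 ≤ f.length := List.length_pos_of_ne_nil hf
  have hL1 : 1 ≤ C.length := le_trans hd1 hlen
  have hdrop : C.dropLast.length = C.length - 1 := by simp
  intro c hc
  rw [stepB, stepB_pass f (C.getLastD 0) q C.dropLast hd1 (by omega)] at hc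
  obtain ⟨hBlen, hBget⟩ := passB_facts f (C.getLastD 0) q C.dropLast
  obtain ⟨k, hk, hck⟩ := List.mem_iff_getElem.mp hc
  rw [hBlen] at hk
  have hcd : c = (((List.range (f.length - 1)).foldl
      (fun c k => c.set ((C.dropLast.length - (f.length - 1)) + k)
        (PySem.Int.mod
          (c.getD ((C.dropLast.length - (f.length - 1)) + k) 0 - C.getLastD 0 * f.getD k 0) q))
      C.dropLast)).getD k 0 := by
    rw [List.getD_eq_getElem _ 0 (by rw [hBlen]; exact hk)]
    exact hck.symm
  rw [hcd, hBget]
  by_cases hcase : (C.dropLast.length - (f.length - 1)) ≤ k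
      ∧ k < (C.dropLast.length - (f.length - 1)) + (f.length - 1) ∧ k < C.dropLast.length
  · rw [if_pos hcase]
    exact pv_mod_idem q _
  · rw [if_neg hcase, pv_getD_dropLast _ k (by omega)]
    exact hnorm _ (pv_getD_mem C k (by omega))

theorem zero_stepB (f : List Int) (q : Int) (C : List Int) (hf : f ≠ [])
    (hlen : f.length ≤ C.length) (hzero : ∀ c ∈ C, c = 0) :
    ∀ c ∈ stepB f q C, c = 0 := by
  have hgd : ∀ k : Nat, C.getD k 0 = 0 := by
    intro k
    by_cases hk : k < C.length
    · exact hzero _ (pv_getD_mem C k hk)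
    · rw [List.getD_eq_getElem?_getD, List.getElem?_eq_none (by omega)]
      rfl
  have hd1 : 1 ≤ f.length := List.length_pos_of_ne_nil hf
  have hL1 : 1 ≤ C.length := le_trans hd1 hlen
  have hC : C ≠ [] := by
    intro h; rw [h] at hL1; simp at hL1
  have hm : C.getLastD 0 = 0 := by
    rw [List.getLastD_eq_getLast?, List.getLast?_eq_some_getLast hC]
    exact hzero _ (List.getLast_mem hC)
  intro c hc
  rw [stepB, stepB_pass f (C.getLastD 0) q C.dropLast hd1 (by simp; omega)] at hc
  obtain ⟨hBlen, hBget⟩ := passB_facts f (C.getLastD 0) q C.dropLast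
  obtain ⟨k, hk, hck⟩ := List.mem_iff_getElem.mp hc
  have hcd : c = (((List.range (f.length - 1)).foldl
      (fun c k => c.set ((C.dropLast.length - (f.length - 1)) + k)
        (PySem.Int.mod
          (c.getD ((C.dropLast.length - (f.length - 1)) + k) 0 - C.getLastD 0 * f.getD k 0) q))
      C.dropLast)).getD k 0 := by
    rw [List.getD_eq_getElem _ 0 hk]
    exact hck.symm
  have hdz : ∀ k : Nat, C.dropLast.getD k 0 = 0 := by
    intro j
    by_cases hj : j < C.dropLast.length
    · rw [pv_getD_dropLast _ j (by simp at hj ⊢; omega)]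
      exact hgd j
    · rw [List.getD_eq_getElem?_getD, List.getElem?_eq_none (by omega)]
      rfl
  rw [hcd, hBget]
  split_ifs
  · rw [hdz, hm, zero_mul, sub_zero, pv_mod_zero]
  · exact hdz k

theorem loop_eq (f : List Int) (q : Int) (hf : f ≠ []) :
    ∀ (L : Nat) (C : List Int), C.length = L → (∀ c ∈ C, PySem.Int.mod c q = c) →
      (q ∣ (f.getLast hf - 1) ∨ (∀ c ∈ C, c = 0) ∨ C.length < f.length) →
      loopA f q (L + 1) C = loopB f q C := by
  have hd1 : 1 ≤ f.length := List.length_pos_of_ne_nil hf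
  intro L
  induction L with
  | zero =>
    intro C hlen _ _
    have hC : C = [] := List.eq_nil_of_length_eq_zero hlen
    subst hC
    rw [loopB]
    simp only [loopA]
    rw [if_neg (by simpa using by omega), if_neg (by simpa using by omega)]
  | succ L ih =>
    intro C hlen hnorm hD
    have hCne : C ≠ [] := by
      intro h; rw [h] at hlen; simp at hlen
    rw [loopB]
    simp only [loopA]
    by_cases hcond : f.length ≤ C.length
    · have hdvd : ∀ hC : C ≠ [], q ∣ (f.getLast hf - 1) * C.getLast hC := by
        intro hC
        rcases hD with hmon | hzero | hshort
        · exact hmon.mul_right _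
        · rw [hzero _ (List.getLast_mem hC), mul_zero]
          exact dvd_zero q
        · omega
      have hD' : q ∣ (f.getLast hf - 1) ∨ (∀ c ∈ stepB f q C, c = 0)
          ∨ (stepB f q C).length < f.length := by
        rcases hD with hmon | hzero | hshort
        · exact Or.inl hmon
        · exact Or.inr (Or.inl (zero_stepB f q C hf hcond hzero))
        · omega
      rw [if_pos (by simpa using hcond), if_pos hcond, dif_neg hCne,
        step_eq f q C hf hdvd hcond hnorm]
      exact ih (stepB f q C) (by rw [length_stepB]; omega)
        (norm_stepB f q C hf hcond hnorm) hD'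
    · rw [if_neg (by simpa using hcond), if_neg hcond]

theorem passRow_facts (B : List Int) (a q : Int) (i : Nat) (c : List Int) :
    (((List.range B.length).foldl
        (fun c k => c.set (i + k) (PySem.Int.mod (c.getD (i + k) 0 + a * B.getD k 0) q)) c)).length
      = c.length
    ∧ ∀ k : Nat,
      (((List.range B.length).foldl
        (fun c k => c.set (i + k) (PySem.Int.mod (c.getD (i + k) 0 + a * B.getD k 0) q)) c)).getD k 0
        = if i ≤ k ∧ k < i + B.length ∧ k < c.length
          then PySem.Int.mod (c.getD k 0 + a * B.getD (k - i) 0) q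
          else c.getD k 0 :=
  foldl_set_window (fun k x => PySem.Int.mod (x + a * B.getD k 0) q) i B.length c

theorem prodA_inv (A B : List Int) (q : Int) (L0 : Nat) (i : Nat) :
    ((List.range i).foldl
        (fun c i' => (List.range B.length).foldl
          (fun c k => c.set (i' + k)
            (PySem.Int.mod (c.getD (i' + k) 0 + A.getD i' 0 * B.getD k 0) q)) c)
        (List.replicate L0 0)).length = L0
    ∧ ∀ k, k < L0 →
      ((List.range i).foldl
        (fun c i' => (List.range B.length).foldl
          (fun c k => c.set (i' + k)
            (PySem.Int.mod (c.getD (i' + k) 0 + A.getD i' 0 * B.getD k 0) q)) c)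
        (List.replicate L0 0)).getD k 0 = PySem.Int.mod (convS A B i k) q := by
  induction i with
  | zero =>
    refine ⟨by simp, fun k hk => ?_⟩
    have h1 : (List.replicate L0 (0:Int)).getD k 0 = 0 := by
      simp [List.getD_eq_getElem?_getD, List.getElem?_replicate, hk]
    rw [List.range_zero, List.foldl_nil, h1, convS]
    simp [pv_mod_zero]
  | succ i ih =>
    obtain ⟨ihl, ihe⟩ := ih
    rw [List.range_succ, List.foldl_append, List.foldl_cons, List.foldl_nil]
    obtain ⟨hl, he⟩ := passRow_facts B (A.getD i 0) q i
      ((List.range i).foldl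
        (fun c i' => (List.range B.length).foldl
          (fun c k => c.set (i' + k)
            (PySem.Int.mod (c.getD (i' + k) 0 + A.getD i' 0 * B.getD k 0) q)) c)
        (List.replicate L0 0))
    refine ⟨by rw [hl, ihl], fun k hk => ?_⟩
    rw [he, ihl]
    have hstep : convS A B (i + 1) k
        = convS A B i k + (if i ≤ k then A.getD i 0 * B.getD (k - i) 0 else 0) := by
      rw [convS, convS, Finset.sum_range_succ]
    by_cases hwin : i ≤ k ∧ k < i + B.length ∧ k < L0
    · rw [if_pos hwin, ihe k hk, hstep, if_pos hwin.1]
      exact pv_mod_congr q _ _ (by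
        have := PySem.Int.floordiv_mul_add_mod (convS A B i k) q
        exact ⟨-PySem.Int.floordiv (convS A B i k) q, by linarith⟩)
    · rw [if_neg hwin, ihe k hk, hstep]
      have hz : (if i ≤ k then A.getD i 0 * B.getD (k - i) 0 else 0) = 0 := by
        by_cases hik : i ≤ k
        · rw [if_pos hik]
          have hB : B.getD (k - i) 0 = 0 := by
            have hout : B.length ≤ k - i := by omega
            rw [List.getD_eq_getElem?_getD, List.getElem?_eq_none (by omega)]
            rfl
          rw [hB, mul_zero]
        · rw [if_neg hik]
      rw [hz, add_zero]

theorem pv_sum_range (cnt : Nat) (f : Nat → Int) :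
    ((List.range cnt).map f).sum = ∑ t ∈ Finset.range cnt, f t := by
  induction cnt with
  | zero => simp
  | succ n ih =>
    rw [List.range_succ, List.map_append, List.sum_append, Finset.sum_range_succ, ih]
    simp

theorem clip_eq (A B : List Int) (k : Nat) :
    ((PySem.List.pyRange (max 0 ((k:Int) - (B.length:Int) + 1))
        (min ((k:Int) + 1) (A.length:Int))).foldl
      (fun s i => s + PySem.List.pyGetD A i 0 * PySem.List.pyGetD B ((k:Int) - i) 0) 0)
    = convS A B A.length k := by
  have hlo : max 0 ((k:Int) - (B.length:Int) + 1) = ((k + 1 - B.length : Nat) : Int) := by omega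
  have hhi : min ((k:Int) + 1) (A.length:Int) = ((min (k+1) A.length : Nat) : Int) := by omega
  rw [hlo, hhi, PySem.List.pyRange_one]
  have hcnt : (((min (k+1) A.length : Nat) : Int) - ((k + 1 - B.length : Nat) : Int)).toNat
      = min (k+1) A.length - (k + 1 - B.length) := by omega
  rw [hcnt, List.foldl_map, PySem.List.foldl_add, zero_add]
  have hterm : ∀ t ∈ List.range (min (k+1) A.length - (k + 1 - B.length)),
      PySem.List.pyGetD A (((k + 1 - B.length : Nat) : Int) + (t:Int)) 0
        * PySem.List.pyGetD B ((k:Int) - (((k + 1 - B.length : Nat) : Int) + (t:Int))) 0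
      = A.getD ((k + 1 - B.length) + t) 0 * B.getD (k - ((k + 1 - B.length) + t)) 0 := by
    intro t ht
    rw [List.mem_range] at ht
    have h1 : (((k + 1 - B.length : Nat) : Int) + (t:Int)) = (((k + 1 - B.length) + t : Nat) : Int) := by
      push_cast; ring
    have h2 : ((k:Int) - (((k + 1 - B.length : Nat) : Int) + (t:Int)))
        = ((k - ((k + 1 - B.length) + t) : Nat) : Int) := by omega
    rw [h2, h1, PySem.List.pyGetD_natCast, PySem.List.pyGetD_natCast]
  rw [List.map_congr_left hterm, pv_sum_range]
  rw [← Finset.sum_Ico_eq_sum_range (f := fun x => A.getD x 0 * B.getD (k - x) 0)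
    (m := k + 1 - B.length) (n := min (k + 1) A.length)]
  rw [convS]
  have hsub : Finset.Ico (k + 1 - B.length) (min (k + 1) A.length) ⊆ Finset.range A.length := by
    intro t ht
    rw [Finset.mem_Ico] at ht
    rw [Finset.mem_range]
    omega
  have hagree : ∀ t ∈ Finset.Ico (k + 1 - B.length) (min (k + 1) A.length),
      A.getD t 0 * B.getD (k - t) 0 = (if t ≤ k then A.getD t 0 * B.getD (k - t) 0 else 0) := by
    intro t ht
    rw [Finset.mem_Ico] at ht
    rw [if_pos (by omega)]
  have hvanish : ∀ t ∈ Finset.range A.length,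
      t ∉ Finset.Ico (k + 1 - B.length) (min (k + 1) A.length) →
      (if t ≤ k then A.getD t 0 * B.getD (k - t) 0 else 0) = 0 := by
    intro t ht hnot
    rw [Finset.mem_range] at ht
    rw [Finset.mem_Ico] at hnot
    by_cases hik : t ≤ k
    · rw [if_pos hik]
      have hB : B.getD (k - t) 0 = 0 := by
        rw [List.getD_eq_getElem?_getD, List.getElem?_eq_none (by omega)]
        rfl
      rw [hB, mul_zero]
    · rw [if_neg hik]
  calc ∑ t ∈ Finset.Ico (k + 1 - B.length) (min (k + 1) A.length), A.getD t 0 * B.getD (k - t) 0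
      = ∑ t ∈ Finset.Ico (k + 1 - B.length) (min (k + 1) A.length),
          (if t ≤ k then A.getD t 0 * B.getD (k - t) 0 else 0) := Finset.sum_congr rfl hagree
    _ = ∑ t ∈ Finset.range A.length, (if t ≤ k then A.getD t 0 * B.getD (k - t) 0 else 0) :=
        Finset.sum_subset hsub hvanish

theorem rowA_bridge (A B : List Int) (q : Int) (i : Nat) (c : List Int) :
    ((PySem.List.pyRange 0 (B.length : Int)).foldl
      (fun c j => PySem.List.pySetD c ((i:Int) + j)
        (PySem.Int.mod (PySem.List.pyGetD c ((i:Int) + j) 0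
          + PySem.List.pyGetD A (i:Int) 0 * PySem.List.pyGetD B j 0) q)) c)
    = (List.range B.length).foldl
        (fun c k => c.set (i + k)
          (PySem.Int.mod (c.getD (i + k) 0 + A.getD i 0 * B.getD k 0) q)) c := by
  have hcnt : ((B.length : Int) - 0).toNat = B.length := by omega
  rw [PySem.List.pyRange_one, hcnt, List.foldl_map]
  simp only [zero_add, ← Nat.cast_add, PySem.List.pySetD_natCast, PySem.List.pyGetD_natCast]

theorem prod_eq (A B : List Int) (q : Int) :
    ((PySem.List.pyRange 0 (A.length : Int)).foldl (fun c i =>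
      (PySem.List.pyRange 0 (B.length : Int)).foldl (fun c j =>
        PySem.List.pySetD c (i + j)
          (PySem.Int.mod
            (PySem.List.pyGetD c (i + j) 0 + PySem.List.pyGetD A i 0 * PySem.List.pyGetD B j 0)
            q)) c)
      (List.replicate ((A.length : Int) + (B.length : Int) - 1).toNat 0))
    = (PySem.List.pyRange 0 ((A.length : Int) + (B.length : Int) - 1)).map (fun k =>
        PySem.Int.mod
          ((PySem.List.pyRange (max 0 (k - (B.length : Int) + 1))
              (min (k + 1) (A.length : Int))).foldl
            (fun s i => s + PySem.List.pyGetD A i 0 * PySem.List.pyGetD B (k - i) 0) 0) q) := by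
  have hnA : ((A.length : Int) - 0).toNat = A.length := by omega
  rw [PySem.List.pyRange_one 0 (A.length : Int), hnA, List.foldl_map]
  simp only [zero_add]
  rw [PySem.List.foldl_congr_mem _ _
      (fun c i => (List.range B.length).foldl
        (fun c k => c.set (i + k)
          (PySem.Int.mod (c.getD (i + k) 0 + A.getD i 0 * B.getD k 0) q)) c) _
      (fun c i _ => rowA_bridge A B q i c)]
  obtain ⟨hPl, hPe⟩ :=
    prodA_inv A B q ((A.length : Int) + (B.length : Int) - 1).toNat A.length
  have hnL : (((A.length : Int) + (B.length : Int) - 1) - 0).toNat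
      = ((A.length : Int) + (B.length : Int) - 1).toNat := by omega
  rw [PySem.List.pyRange_one 0 ((A.length : Int) + (B.length : Int) - 1), hnL, List.map_map]
  apply pv_list_ext
  · rw [hPl, List.length_map, List.length_range]
  · intro k hk
    rw [hPl] at hk
    rw [hPe k hk, PySem.List.getD_map_range _ _ _ _ hk]
    simp only [Function.comp_apply, zero_add]
    rw [clip_eq]

-- ===== VERDICT (by name: the statement is the Claim_ definition above) =====
theorem multPolyNaive_spec : Claim_equal_multPolyNaive := by
  intro A B f q _hDom hPre
  obtain ⟨hf, hPre2⟩ := hPre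
  have hlast : f.getLastD 0 = f.getLast hf := by
    rw [List.getLastD_eq_getLast?, List.getLast?_eq_some_getLast hf]
    rfl
  have hd1 : 1 ≤ f.length := List.length_pos_of_ne_nil hf
  unfold Spec_multPolyNaive
  simp only [multPolyNaive, multPolyNaive_alt]
  rw [prod_eq A B q]
  have hnorm : ∀ c ∈ (PySem.List.pyRange 0 ((A.length : Int) + (B.length : Int) - 1)).map
      (fun k => PySem.Int.mod
        ((PySem.List.pyRange (max 0 (k - (B.length : Int) + 1))
            (min (k + 1) (A.length : Int))).foldl
          (fun s i => s + PySem.List.pyGetD A i 0 * PySem.List.pyGetD B (k - i) 0) 0) q),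
      PySem.Int.mod c q = c := by
    intro c hc
    obtain ⟨a, _, rfl⟩ := List.mem_map.mp hc
    exact pv_mod_idem q _
  have hplen : ((PySem.List.pyRange 0 ((A.length : Int) + (B.length : Int) - 1)).map
      (fun k => PySem.Int.mod
        ((PySem.List.pyRange (max 0 (k - (B.length : Int) + 1))
            (min (k + 1) (A.length : Int))).foldl
          (fun s i => s + PySem.List.pyGetD A i 0 * PySem.List.pyGetD B (k - i) 0) 0) q)).length
      = ((A.length : Int) + (B.length : Int) - 1).toNat := by
    rw [List.length_map, PySem.List.length_pyRange_one]
    omega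
  apply loop_eq f q hf _ _ rfl hnorm
  -- discharge the loop invariant disjunction from Pre_
  rcases hPre2 with hempty | ⟨hq0, hcase⟩
  · -- empty product: the coefficient list is shorter than f
    refine Or.inr (Or.inr ?_)
    rw [hplen]
    omega
  rcases hcase with hshort | hA0 | hB0 | hmon
  · refine Or.inr (Or.inr ?_)
    rw [hplen]
    omega
  · -- A = []: every product coefficient is 0
    refine Or.inr (Or.inl ?_)
    intro c hc
    obtain ⟨a, ha, rfl⟩ := List.mem_map.mp hc
    rw [PySem.List.mem_pyRange_one] at ha
    rw [PySem.List.pyRange_one_eq_nil (by omega), List.foldl_nil, pv_mod_zero]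
  · -- B = []: the clipped range is empty as well
    refine Or.inr (Or.inl ?_)
    intro c hc
    obtain ⟨a, ha, rfl⟩ := List.mem_map.mp hc
    rw [PySem.List.mem_pyRange_one] at ha
    rw [PySem.List.pyRange_one_eq_nil (by omega), List.foldl_nil, pv_mod_zero]
  · refine Or.inl ?_
    rw [← PySem.Int.mod_eq_zero_iff_dvd, ← hlast]
    exact hmon
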